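-- pv_equiv track=rewrite | github.com/czer323/d3-item-salvager | frontend/src/services/salvage_classifier.py | classify_usage_contexts
-- ===== SOURCE A (Python) =====
-- from enum import Enum
--
-- class SalvageLabel(str, Enum):
--     """Enumeration of supported salvage disposition labels."""
--
--     KEEP = "keep"
--     FOLLOWER = "follower"
--     KANAI = "kanai"
--     SALVAGE = "salvage"
--
--     @property
--     def display_name(self) -> str:
--         """Return a human-friendly label."""
--         return _DISPLAY_NAMES[self]
--
-- def classify_usage_contexts(contexts: tuple[str, ...]) -> SalvageLabel:
--     """Derive a salvage label from usage contexts."""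
--     normalized = {context.lower() for context in contexts}
--     if "unused" in normalized:
--         return SalvageLabel.SALVAGE
--     if "kanai" in normalized:
--         return SalvageLabel.KANAI
--     if "follower" in normalized:
--         return SalvageLabel.FOLLOWER
--     return SalvageLabel.KEEP
-- ===== SOURCE B (Python) =====
-- from enum import Enum
--
--
-- class SalvageLabel(str, Enum):
--     """Enumeration of supported salvage disposition labels."""
--
--     KEEP = "keep"
--     FOLLOWER = "follower"
--     KANAI = "kanai"
--     SALVAGE = "salvage"
--
--
-- _RANK = {"unused": 0, "kanai": 1, "follower": 2}
-- _BY_RANK = (SalvageLabel.SALVAGE, SalvageLabel.KANAI, SalvageLabel.FOLLOWER, SalvageLabel.KEEP)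
--
--
-- def classify_usage_contexts(contexts):
--     """Derive a salvage label from usage contexts (single-pass min-rank reduction)."""
--     best = 3
--     for context in contexts:
--         r = _RANK.get(context.lower(), 3)
--         if r < best:
--             best = r
--     return _BY_RANK[best]
-- ===== Notes on version B (the rewrite author's own statement) =====
-- stated objective: alternative
-- what changed: Replaced 'build a lowercase set, then three ordered membership probes' by a single accumulation loop that keeps the minimum priority rank of the keywords seen and maps the final rank back to a label.
import Mathlib
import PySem

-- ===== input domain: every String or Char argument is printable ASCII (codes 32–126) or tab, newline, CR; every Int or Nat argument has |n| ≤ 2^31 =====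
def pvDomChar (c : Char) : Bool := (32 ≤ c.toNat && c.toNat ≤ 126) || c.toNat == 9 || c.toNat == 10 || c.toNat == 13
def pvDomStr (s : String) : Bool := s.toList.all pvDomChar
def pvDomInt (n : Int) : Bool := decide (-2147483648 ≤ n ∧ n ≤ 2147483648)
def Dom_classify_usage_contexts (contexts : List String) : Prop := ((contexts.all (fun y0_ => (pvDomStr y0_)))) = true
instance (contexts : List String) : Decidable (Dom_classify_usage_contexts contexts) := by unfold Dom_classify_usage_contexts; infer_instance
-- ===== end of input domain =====

-- B replaces the "lowercase set + three ordered membership probes" of A by a single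
-- min-rank accumulation loop over the contexts; alternative decomposition, same cost.


-- ===== PORT A =====
def classify_usage_contexts (contexts : List String) : String :=
  let normalized : PySem.Set String := PySem.Set.ofList (contexts.map PySem.Str.lower)
  if PySem.Set.contains normalized "unused" then "salvage"
  else if PySem.Set.contains normalized "kanai" then "kanai"
  else if PySem.Set.contains normalized "follower" then "follower"
  else "keep"

-- ===== PORT B =====
-- rank lookup: _RANK.get(context.lower(), 3)
def pvRank (s : String) : Int :=
  PySem.Dict.getD (PySem.Dict.ofList [("unused", (0:Int)), ("kanai", 1), ("follower", 2)]) s 3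

def classify_usage_contexts_alt (contexts : List String) : String :=
  let best := contexts.foldl (fun b c =>
    let r := pvRank (PySem.Str.lower c)
    if r < b then r else b) (3 : Int)
  match best with
  | 0 => "salvage"
  | 1 => "kanai"
  | 2 => "follower"
  | _ => "keep"

-- ===== PRECONDITION & SPEC =====
def Spec_classify_usage_contexts (contexts : List String) (out : String) : Prop := out = classify_usage_contexts_alt contexts
instance (contexts : List String) (out : String) : Decidable (Spec_classify_usage_contexts contexts out) := by unfold Spec_classify_usage_contexts; infer_instance

-- ===== CLAIM (what is proved, stated in full; the proofs are below) =====
def Claim_equal_classify_usage_contexts : Prop := ∀ (contexts : List String), Dom_classify_usage_contexts contexts → Spec_classify_usage_contexts contexts (classify_usage_contexts contexts)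

-- ===== LEMMAS AND PROOFS =====

-- the minimum rank of the lowered contexts, expressed by membership (proof-side helper)
def pvM (contexts : List String) : Int :=
  if "unused" ∈ contexts.map PySem.Str.lower then 0
  else if "kanai" ∈ contexts.map PySem.Str.lower then 1
  else if "follower" ∈ contexts.map PySem.Str.lower then 2 else 3

theorem pvRank_eq (s : String) :
    pvRank s = if s = "unused" then 0 else if s = "kanai" then 1 else if s = "follower" then 2 else 3 := by
  unfold pvRank
  have hit : (PySem.Dict.ofList [("unused", (0:Int)), ("kanai", 1), ("follower", 2)]).items
      = [("unused", (0:Int)), ("kanai", 1), ("follower", 2)] := by decide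
  by_cases h1 : s = "unused"
  · subst h1; simp [PySem.Dict.getD_eq_get?_getD, PySem.Dict.get?, hit]
  by_cases h2 : s = "kanai"
  · subst h2; simp [PySem.Dict.getD_eq_get?_getD, PySem.Dict.get?, hit, List.find?]
  by_cases h3 : s = "follower"
  · subst h3; simp [PySem.Dict.getD_eq_get?_getD, PySem.Dict.get?, hit, List.find?]
  have e1 : ("unused" == s) = false := by simp only [beq_eq_false_iff_ne, ne_eq]; exact fun h => h1 h.symm
  have e2 : ("kanai" == s) = false := by simp only [beq_eq_false_iff_ne, ne_eq]; exact fun h => h2 h.symm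
  have e3 : ("follower" == s) = false := by simp only [beq_eq_false_iff_ne, ne_eq]; exact fun h => h3 h.symm
  simp [PySem.Dict.getD_eq_get?_getD, PySem.Dict.get?, hit, List.find?, e1, e2, e3, h1, h2, h3]

theorem pvM_cons (c : String) (l : List String) :
    pvM (c :: l) = min (pvRank (PySem.Str.lower c)) (pvM l) := by
  unfold pvM
  rw [pvRank_eq]
  by_cases h1 : PySem.Str.lower c = "unused" <;>
    by_cases h2 : PySem.Str.lower c = "kanai" <;>
    by_cases h3 : PySem.Str.lower c = "follower" <;>
    simp_all [List.mem_cons] <;> split_ifs <;> simp_all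

theorem pvM_bounds (l : List String) : 0 ≤ pvM l ∧ pvM l ≤ 3 := by
  unfold pvM; split_ifs <;> omega

theorem pvRank_bounds (s : String) : 0 ≤ pvRank s ∧ pvRank s ≤ 3 := by
  rw [pvRank_eq]; split_ifs <;> omega

theorem fold_eq_min_pvM (l : List String) (b : Int) (hb : b ≤ 3) :
    l.foldl (fun b c =>
      let r := pvRank (PySem.Str.lower c)
      if r < b then r else b) b = min b (pvM l) := by
  induction l generalizing b with
  | nil => simp [pvM]; omega
  | cons c l ih =>
    have hr := pvRank_bounds (PySem.Str.lower c)
    rw [List.foldl_cons, ih, pvM_cons]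
    · simp only []
      split_ifs <;> omega
    · simp only []
      split_ifs <;> omega


-- ===== VERDICT (by name: the statement is the Claim_ definition above) =====
theorem classify_usage_contexts_spec : Claim_equal_classify_usage_contexts := by
  intro contexts _
  unfold Spec_classify_usage_contexts classify_usage_contexts classify_usage_contexts_alt
  rw [fold_eq_min_pvM _ _ (by omega)]
  have hb := pvM_bounds contexts
  simp only [PySem.Set.contains_iff, PySem.Set.mem_ofList]
  simp only [pvM]
  split_ifs <;> simp_all
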